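-- pv_equiv track=rewrite | github.com/jimezsa/Deep_Assembly_Lines | battery_order/lstm_LOCO_cross-val_sliding_window.py | group_events
-- ===== SOURCE A (Python) =====
-- def group_events(arr):
--     """Extract event spans"""
--     events = []
--     i = 0
--     while i < len(arr):
--         if arr[i] == 1:
--             j = i
--             while j < len(arr) and arr[j] == 1:
--                 j += 1
--             events.append((i, j-1))
--             i = j
--         else:
--             i += 1
--     return events
-- ===== SOURCE B (Python) =====
-- def group_events(arr):
--     """Extract event spans"""
--     events = []
--     start = None
--     for i, x in enumerate(arr):
--         if x == 1:
--             if start is None: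
--                 start = i
--         elif start is not None:
--             events.append((start, i - 1))
--             start = None
--     if start is not None:
--         events.append((start, len(arr) - 1))
--     return events
-- ===== Notes on version B (the rewrite author's own statement) =====
-- stated objective: simpler
-- what changed: Replaced the nested while-loop with index jumping by a single flat enumerate pass that keeps a 'start' marker for the current run of 1s and flushes the trailing run after the loop.
import Mathlib
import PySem

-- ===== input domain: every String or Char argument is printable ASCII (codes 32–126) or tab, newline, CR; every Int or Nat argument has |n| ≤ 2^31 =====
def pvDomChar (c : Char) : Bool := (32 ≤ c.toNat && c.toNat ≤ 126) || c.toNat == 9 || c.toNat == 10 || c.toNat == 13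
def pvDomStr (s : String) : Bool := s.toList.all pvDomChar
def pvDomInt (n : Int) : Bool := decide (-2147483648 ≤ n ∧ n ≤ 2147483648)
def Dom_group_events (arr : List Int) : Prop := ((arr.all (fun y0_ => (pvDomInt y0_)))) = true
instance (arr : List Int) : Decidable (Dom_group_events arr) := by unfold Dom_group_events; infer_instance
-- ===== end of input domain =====

-- B replaces A's nested two-pointer while loops by one flat pass with a 'start' run marker (objective: simpler).

-- ===== PORT A =====
-- inner while loop of A: 'while j < len(arr) and arr[j] == 1: j += 1'.
-- Fuel = number of remaining indices (arr.length - j at the call), so the fuel never runs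
-- out while the loop condition still holds; indices are always in range in A, so
-- arr.getD j 0 is exactly Python's arr[j] here.
def geInnerAux (arr : List Int) : Nat → Nat → Nat
  | 0, j => j
  | fuel + 1, j => if j < arr.length ∧ arr.getD j 0 = 1 then geInnerAux arr fuel (j + 1) else j

def geInner (arr : List Int) (j : Nat) : Nat := geInnerAux arr (arr.length - j) j

-- outer while loop of A; fuel = arr.length - i at the call (i advances by ≥ 1 per iteration)
def geOuterAux (arr : List Int) : Nat → Nat → List (Int × Int) → List (Int × Int)
  | 0, _, events => events
  | fuel + 1, i, events =>
    if i < arr.length then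
      if arr.getD i 0 = 1 then
        let j := geInner arr i
        geOuterAux arr fuel j (events ++ [((i : Int), (j : Int) - 1)])
      else
        geOuterAux arr fuel (i + 1) events
    else events

def group_events (arr : List Int) : List (Int × Int) := geOuterAux arr arr.length 0 []

-- ===== PORT B =====
-- flat enumerate pass carrying (events, start); returns the final pair so the trailing run can be flushed
def geScan (l : List Int) (i : Nat) (start : Option Nat) (events : List (Int × Int)) :
    List (Int × Int) × Option Nat :=
  match l with
  | [] => (events, start)
  | x :: rest =>
    if x = 1 then
      match start with
      | none => geScan rest (i + 1) (some i) events
      | some s => geScan rest (i + 1) (some s) events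
    else
      match start with
      | none => geScan rest (i + 1) none events
      | some s => geScan rest (i + 1) none (events ++ [((s : Int), (i : Int) - 1)])

def group_events_alt (arr : List Int) : List (Int × Int) :=
  match geScan arr 0 none [] with
  | (events, none) => events
  | (events, some s) => events ++ [((s : Int), (arr.length : Int) - 1)]

-- ===== PRECONDITION & SPEC =====
def Spec_group_events (arr : List Int) (out : List (Int × Int)) : Prop := out = group_events_alt arr
instance (arr : List Int) (out : List (Int × Int)) : Decidable (Spec_group_events arr out) := by unfold Spec_group_events; infer_instance

-- ===== CLAIM (what is proved, stated in full; the proofs are below) =====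
def Claim_equal_group_events : Prop := ∀ (arr : List Int), Dom_group_events arr → Spec_group_events arr (group_events arr)

-- ===== LEMMAS AND PROOFS =====

-- flush the scan result the way group_events_alt does
def geFinish (arr : List Int) (p : List (Int × Int) × Option Nat) : List (Int × Int) :=
  match p with
  | (events, none) => events
  | (events, some s) => events ++ [((s : Int), (arr.length : Int) - 1)]

theorem geInnerAux_spec (arr : List Int) (fuel j : Nat) (hfuel : arr.length ≤ fuel + j) :
    j ≤ geInnerAux arr fuel j ∧
    (∀ k, j ≤ k → k < geInnerAux arr fuel j → arr.getD k 0 = 1) ∧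
    ¬ (geInnerAux arr fuel j < arr.length ∧ arr.getD (geInnerAux arr fuel j) 0 = 1) := by
  induction fuel generalizing j with
  | zero =>
    have h0 : geInnerAux arr 0 j = j := rfl
    rw [h0]
    exact ⟨Nat.le_refl j, fun k hk1 hk2 => absurd hk1 (by omega), fun hc => absurd hc.1 (by omega)⟩
  | succ n ih =>
    by_cases hc : j < arr.length ∧ arr.getD j 0 = 1
    · obtain ⟨h1, h2, h3⟩ := ih (j + 1) (by omega)
      simp only [geInnerAux, if_pos hc]
      refine ⟨by omega, ?_, h3⟩
      intro k hk1 hk2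
      rcases Nat.eq_or_lt_of_le hk1 with h | h
      · exact h ▸ hc.2
      · exact h2 k h hk2
    · simp only [geInnerAux, if_neg hc]
      exact ⟨Nat.le_refl j, fun k hk1 hk2 => absurd hk1 (by omega), hc⟩

theorem geInnerAux_le (arr : List Int) (fuel j : Nat) (h : j ≤ arr.length) :
    geInnerAux arr fuel j ≤ arr.length := by
  induction fuel generalizing j with
  | zero => exact h
  | succ n ih =>
    by_cases hc : j < arr.length ∧ arr.getD j 0 = 1
    · simp only [geInnerAux, if_pos hc]; exact ih (j + 1) hc.1
    · simp only [geInnerAux, if_neg hc]; exact h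

theorem geInnerAux_ge (arr : List Int) (fuel j : Nat) : j ≤ geInnerAux arr fuel j := by
  induction fuel generalizing j with
  | zero => exact Nat.le_refl j
  | succ n ih =>
    by_cases hc : j < arr.length ∧ arr.getD j 0 = 1
    · simp only [geInnerAux, if_pos hc]
      have := ih (j + 1); omega
    · simp only [geInnerAux, if_neg hc]
      exact Nat.le_refl j

theorem geInnerAux_gt (arr : List Int) (fuel j : Nat)
    (h : j < arr.length) (h1 : arr.getD j 0 = 1) : j < geInnerAux arr (fuel + 1) j := by
  simp only [geInnerAux, if_pos (And.intro h h1)]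
  have := geInnerAux_ge arr fuel (j + 1)
  omega

theorem drop_cons (arr : List Int) (i : Nat) (h : i < arr.length) :
    arr.drop i = arr.getD i 0 :: arr.drop (i + 1) := by
  rw [List.drop_eq_getElem_cons h, List.getD_eq_getElem arr 0 h]

-- over a run of 1s the scan just carries the marker along
theorem geScan_run (arr : List Int) (i j : Nat) (s : Nat) (events : List (Int × Int))
    (hij : i ≤ j) (hjl : j ≤ arr.length)
    (hrun : ∀ k, i ≤ k → k < j → arr.getD k 0 = 1) :
    geScan (arr.drop i) i (some s) events = geScan (arr.drop j) j (some s) events := by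
  induction j with
  | zero =>
    have : i = 0 := by omega
    simp [this]
  | succ n ih =>
    rcases Nat.eq_or_lt_of_le hij with h | h
    · rw [h]
    · have hi : i ≤ n := by omega
      have hn : n < arr.length := by omega
      rw [ih hi (by omega) (fun k hk1 hk2 => hrun k hk1 (by omega))]
      rw [drop_cons arr n hn]
      have h1 : arr.getD n 0 = 1 := hrun n hi (by omega)
      rw [List.getD_eq_getElem?_getD] at h1
      simp [geScan, h1]

-- main invariant: the outer loop from position i equals the flushed scan of the tail from i
theorem geOuter_eq (arr : List Int) (fuel i : Nat) (events : List (Int × Int))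
    (hfuel : arr.length ≤ fuel + i) :
    geOuterAux arr fuel i events = geFinish arr (geScan (arr.drop i) i none events) := by
  induction fuel generalizing i events with
  | zero =>
    have hd : arr.drop i = [] := List.drop_eq_nil_of_le (by omega)
    simp [geOuterAux, hd, geScan, geFinish]
  | succ n ih =>
    by_cases h : i < arr.length
    · rw [drop_cons arr i h]
      by_cases h1 : arr.getD i 0 = 1
      · have hgej : geInner arr i = geInnerAux arr (arr.length - i) i := rfl
        obtain ⟨hge, hrun, hend⟩ := geInnerAux_spec arr (arr.length - i) i (by omega)
        rw [← hgej] at hge hrun hend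
        have hjgt : i < geInner arr i := by
          rw [hgej]
          have he : arr.length - i = (arr.length - i - 1) + 1 := by omega
          rw [he]
          exact geInnerAux_gt arr (arr.length - i - 1) i h h1
        have hjle : geInner arr i ≤ arr.length := by
          rw [hgej]; exact geInnerAux_le arr _ i (by omega)
        simp only [geOuterAux, if_pos h, if_pos h1]
        set j := geInner arr i with hj
        -- A side: recurse at j with the event appended
        rw [ih j (events ++ [((i : Int), (j : Int) - 1)]) (by omega)]
        -- B side: first step enters the run (start := some i), then carry over the run to j
        have h1' : arr[i]?.getD 0 = 1 := by rw [← List.getD_eq_getElem?_getD]; exact h1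
        have hstep : geScan (arr.getD i 0 :: arr.drop (i + 1)) i none events =
            geScan (arr.drop (i + 1)) (i + 1) (some i) events := by
          simp [geScan, h1']
        rw [hstep]
        rw [geScan_run arr (i + 1) j i events (by omega) hjle
          (fun k hk1 hk2 => hrun k (by omega) hk2)]
        -- at j: either end of array (flush with len-1 = j-1) or a non-1 element (append there)
        rcases Nat.eq_or_lt_of_le hjle with hjend | hjlt
        · rw [hjend, List.drop_length]
          simp [geScan, geFinish]
        · have hj1 : arr.getD j 0 ≠ 1 := fun hc => hend ⟨hjlt, hc⟩
          rw [List.getD_eq_getElem?_getD] at hj1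
          rw [drop_cons arr j hjlt]
          simp [geScan, hj1]
      · simp only [geOuterAux, if_pos h, if_neg h1]
        rw [ih (i + 1) events (by omega)]
        rw [List.getD_eq_getElem?_getD] at h1
        simp [geScan, h1]
    · have hd : arr.drop i = [] := List.drop_eq_nil_of_le (by omega)
      simp [geOuterAux, h, hd, geScan, geFinish]

-- ===== VERDICT (by name: the statement is the Claim_ definition above) =====
theorem group_events_spec : Claim_equal_group_events := by
  intro arr _
  unfold Spec_group_events group_events group_events_alt
  have := geOuter_eq arr arr.length 0 [] (by omega)
  simpa [geFinish] using this
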